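-- pv_equiv track=rewrite | github.com/Princever/DM_Prefixspan | util.py | genPlotDatas
-- ===== SOURCE A (Python) =====
-- def getItems(seqs):
--     items = []
--     for custom in seqs:
--         for basket in custom:
--             for item in basket:
--                 if [item] not in items:
--                     items.append([item])
--
--     items.sort()
--     return items
--
-- def genStage(maxSeqs):
--     allitem = getItems(maxSeqs)
--     allitems = []
--     for each in allitem:
--         allitems += each
--     items = {}
--     for each in allitems:
--         items.setdefault(each,0)
--     return items
--
-- def genPlotDatas(maxSeqs):
--     stages = []
--     count = 0
--     while count <10:
--         stages.append({})
--         stages[count] = genStage(maxSeqs)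
--         count += 1
--     for custom in maxSeqs:
--         nowstage = 0
--         for basket in custom:
--             for item in basket:
--                 stages[nowstage][item] += 1
--             nowstage += 1
--             if nowstage >= 10:
--                 break
--
--     return stages
-- ===== SOURCE B (Python) =====
-- def genPlotDatas(maxSeqs):
--     # transposed traversal: build each stage from its column of baskets and count
--     sorted_items = sorted({item for custom in maxSeqs for basket in custom for item in basket})
--     stages = []
--     for i in range(10):
--         column = [item for custom in maxSeqs if i < len(custom) for item in custom[i]]
--         stages.append({item: column.count(item) for item in sorted_items})
--     return stages
-- ===== Notes on version B (the rewrite author's own statement) =====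
-- stated objective: faster
-- what changed: A pre-builds 10 zero-filled dicts, each time rebuilding the sorted distinct-item list with quadratic list membership, and increments them in place while scanning customers; B transposes the traversal: it computes the sorted item set once, then for each stage 0-9 flattens that stage's column of baskets across all customers and builds the dict directly from per-item counts of the column.
import Mathlib
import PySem

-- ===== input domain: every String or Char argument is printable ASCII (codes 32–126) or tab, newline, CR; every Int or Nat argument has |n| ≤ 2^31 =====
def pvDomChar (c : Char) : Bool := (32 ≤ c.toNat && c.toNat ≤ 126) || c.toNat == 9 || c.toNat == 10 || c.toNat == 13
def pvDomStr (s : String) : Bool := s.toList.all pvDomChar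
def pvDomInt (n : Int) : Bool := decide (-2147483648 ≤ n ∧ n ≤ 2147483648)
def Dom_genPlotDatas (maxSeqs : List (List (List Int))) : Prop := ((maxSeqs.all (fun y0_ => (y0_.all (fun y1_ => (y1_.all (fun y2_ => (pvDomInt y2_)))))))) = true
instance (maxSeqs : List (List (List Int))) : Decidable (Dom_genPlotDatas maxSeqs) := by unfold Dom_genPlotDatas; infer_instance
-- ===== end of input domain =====

-- B transposes the traversal: sorted item set once, then each of the 10 stage dicts
-- is built directly from per-item counts of that stage's flattened column of baskets
-- (A pre-builds 10 zero-filled dicts and increments them in place across customers).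


-- ===== PORT A =====

def getItemsA (seqs : List (List (List Int))) : List (List Int) :=
  let items : List (List Int) :=
    seqs.foldl (fun items custom =>
      custom.foldl (fun items basket =>
        basket.foldl (fun items item =>
          if [item] ∈ items then items else items ++ [[item]]) items) items) []
  PySem.List.sorted items (fun x => x) false

def genStageA (maxSeqs : List (List (List Int))) : PySem.Dict Int Int :=
  let allitem := getItemsA maxSeqs
  let allitems : List Int := allitem.foldl (fun acc each => acc ++ each) []
  allitems.foldl (fun d each => d.setdefault each 0) PySem.Dict.empty

-- the inner 'for basket in custom' loop of A, with its 'break' once nowstage reaches 10;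
-- 'stages[nowstage][item] += 1' is exact here: 0 ≤ nowstage ≤ 9 < len(stages) and every
-- item is already a key of the stage dict (genStage seeds all items), so pyGetD/List.set
-- at nowstage.toNat and Dict.modify are exactly Python's indexing and 'd[item] += 1'
def basketLoopA (baskets : List (List Int)) (stages : List (PySem.Dict Int Int))
    (nowstage : Int) : List (PySem.Dict Int Int) :=
  match baskets with
  | [] => stages
  | basket :: rest =>
      let d := basket.foldl (fun d item => d.modify item 0 (· + 1))
                 (PySem.List.pyGetD stages nowstage PySem.Dict.empty)
      let stages := stages.set nowstage.toNat d
      if nowstage + 1 ≥ 10 then stages else basketLoopA rest stages (nowstage + 1)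

def genPlotDatas (maxSeqs : List (List (List Int))) : List (List (Int × Int)) :=
  let stages : List (PySem.Dict Int Int) :=
    (PySem.List.pyRange 0 10 1).foldl (fun stages _ => stages ++ [genStageA maxSeqs]) []
  let stages := maxSeqs.foldl (fun stages custom => basketLoopA custom stages 0) stages
  stages.map (fun d => d.items)

-- ===== PORT B =====

-- 'custom[i]' in B's column comprehension is guarded by 'i < len(custom)', so pyGetD is exact
def genPlotDatas_alt (maxSeqs : List (List (List Int))) : List (List (Int × Int)) :=
  let sortedItems : List Int :=
    PySem.List.sorted
      (PySem.Set.ofList (maxSeqs.flatMap (fun custom =>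
        custom.flatMap (fun basket => basket))))
      (fun x => x) false
  (PySem.List.pyRange 0 10 1).foldl (fun stages i =>
    let column : List Int := maxSeqs.flatMap (fun custom =>
      if i < (custom.length : Int) then PySem.List.pyGetD custom i [] else [])
    stages ++ [sortedItems.map (fun item => (item, (column.count item : Int)))]) []

-- ===== PRECONDITION & SPEC =====
def Spec_genPlotDatas (maxSeqs : List (List (List Int))) (out : List (List (Int × Int))) : Prop := out = genPlotDatas_alt maxSeqs
instance (maxSeqs : List (List (List Int))) (out : List (List (Int × Int))) : Decidable (Spec_genPlotDatas maxSeqs out) := by unfold Spec_genPlotDatas; infer_instance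

-- ===== CLAIM (what is proved, stated in full; the proofs are below) =====
def Claim_equal_genPlotDatas : Prop := ∀ (maxSeqs : List (List (List Int))), Dom_genPlotDatas maxSeqs → Spec_genPlotDatas maxSeqs (genPlotDatas maxSeqs)

-- ===== LEMMAS AND PROOFS =====

-- the full item stream and its sorted distinct-item list; the per-stage counting step
def pvItems (maxSeqs : List (List (List Int))) : List Int :=
  maxSeqs.flatMap (fun cu => cu.flatMap (fun b => b))

def pvSorted (maxSeqs : List (List (List Int))) : List Int :=
  PySem.List.sorted (PySem.Set.ofList (pvItems maxSeqs)) (fun x => x) false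

def pvCol (maxSeqs : List (List (List Int))) (i : Nat) : List Int :=
  maxSeqs.flatMap (fun cu => if i < cu.length then cu.getD i [] else [])

def incA (d : PySem.Dict Int Int) (b : List Int) : PySem.Dict Int Int :=
  b.foldl (fun d item => d.modify item 0 (· + 1)) d

def stepA (i : Nat) (d : PySem.Dict Int Int) (cu : List (List Int)) : PySem.Dict Int Int :=
  if i < cu.length then incA d (cu.getD i []) else d

lemma getD_set {α : Type} (st : List α) (k : Nat) (d e : α) (i : Nat) :
    (st.set k d).getD i e = if k = i ∧ k < st.length then d else st.getD i e := by
  simp only [List.getD_eq_getElem?_getD, List.getElem?_set]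
  split_ifs <;> first | rfl | omega | simp_all

lemma foldl_update_flatMap {α β : Type} [BEq β] [LawfulBEq β] (l : List α) (g : α → List β) :
    ∀ (s : PySem.Set β), l.foldl (fun s a => PySem.Set.update s (g a)) s
      = PySem.Set.update s (l.flatMap g) := by
  induction l with
  | nil => intro s; simp [PySem.Set.update_nil]
  | cons a t ih =>
      intro s
      simp only [List.foldl_cons, List.flatMap_cons, PySem.Set.update_append, ih]

lemma basket_fold_eq (b : List Int) (s : PySem.Set (List Int)) :
    b.foldl (fun items item => if [item] ∈ items then items else items ++ [[item]]) s
      = PySem.Set.update s (b.map (fun x => [x])) := by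
  rw [PySem.Set.update_map_eq_foldl_add]
  exact PySem.List.foldl_congr_mem _ _ _ _
    (fun acc x _ => (PySem.Set.add_eq_ite acc [x]).symm)

lemma ofList_map_singleton (xs : List Int) :
    PySem.Set.ofList (xs.map (fun x => [x])) = (PySem.Set.ofList xs).map (fun x => [x]) := by
  induction xs using List.reverseRecOn with
  | nil => rfl
  | append_singleton t x ih =>
      rw [List.map_append, List.map_singleton, PySem.Set.ofList_append_singleton,
        PySem.Set.ofList_append_singleton, ih, PySem.Set.add_eq_ite, PySem.Set.add_eq_ite]
      have hmem : ([x] ∈ (PySem.Set.ofList t).map (fun y => [y])) ↔ x ∈ PySem.Set.ofList t := by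
        constructor
        · intro h
          obtain ⟨a, ha, he⟩ := List.mem_map.mp h
          obtain rfl : a = x := by simpa using he
          exact ha
        · intro h
          exact List.mem_map.mpr ⟨x, h, rfl⟩
      by_cases hx : x ∈ PySem.Set.ofList t
      · rw [if_pos hx, if_pos (hmem.mpr hx)]
      · rw [if_neg hx, if_neg (fun hc => hx (hmem.mp hc)), List.map_append, List.map_singleton]

lemma singleton_lt_singleton (a b : Int) : ([a] < [b]) ↔ a < b := by
  rw [List.cons_lt_cons_iff]
  constructor
  · rintro (h | ⟨rfl, h⟩)
    · exact h
    · exact absurd h (by decide)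
  · exact Or.inl

lemma insertBy_single (x : Int) (acc : List Int) :
    PySem.List.insertBy (fun a b : List Int => decide (a < b)) [x] (acc.map (fun y => [y]))
      = (PySem.List.insertBy (fun a b : Int => decide (a < b)) x acc).map (fun y => [y]) := by
  induction acc with
  | nil => rfl
  | cons y ys ih =>
      simp only [List.map_cons, PySem.List.insertBy]
      rw [show (decide (([x] : List Int) < [y])) = decide (x < y) by
        simp [singleton_lt_singleton]]
      by_cases h : x < y <;> simp [h, ih]

lemma foldl_insertBy_map (s : List Int) : ∀ (acc : List Int),
    List.foldl (fun acc x => PySem.List.insertBy (fun a b : List Int => decide (a < b)) x acc)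
        (acc.map (fun y => [y])) (s.map (fun x => [x]))
      = (List.foldl (fun acc x => PySem.List.insertBy (fun a b : Int => decide (a < b)) x acc)
          acc s).map (fun y => [y]) := by
  induction s with
  | nil => intro acc; rfl
  | cons y ys ih =>
      intro acc
      simp only [List.map_cons, List.foldl_cons, insertBy_single]
      exact ih _

lemma sorted_map_singleton (s : List Int) :
    PySem.List.sorted (s.map (fun x => [x])) (fun x => x) false
      = (PySem.List.sorted s (fun x => x) false).map (fun x => [x]) := by
  rw [PySem.List.sorted_eq_foldl_insertBy, PySem.List.sorted_eq_foldl_insertBy]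
  simpa using foldl_insertBy_map s []

lemma getItemsA_eq (maxSeqs : List (List (List Int))) :
    getItemsA maxSeqs = (pvSorted maxSeqs).map (fun x => [x]) := by
  simp only [getItemsA, basket_fold_eq, foldl_update_flatMap, PySem.Set.update_nil_left]
  have h1 : List.flatMap (List.flatMap (List.map (fun (x : Int) => [x]))) maxSeqs
      = (pvItems maxSeqs).map (fun x => [x]) := by
    simp only [pvItems, List.map_flatMap]
  have h2 : PySem.List.sorted (PySem.Set.ofList (pvItems maxSeqs)) (fun x => x) false
      = pvSorted maxSeqs := rfl
  rw [h1, ofList_map_singleton, sorted_map_singleton, h2]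

lemma setdefault_fold_items (l : List Int) :
    ∀ (d : PySem.Dict Int Int), l.Nodup → (∀ x ∈ l, d.contains x = false) →
    (l.foldl (fun d each => d.setdefault each 0) d).items
      = d.items ++ l.map (fun x => (x, (0 : Int))) := by
  induction l with
  | nil => intro d _ _; simp
  | cons x t ih =>
      intro d hnd hc
      have hcx : d.contains x = false := hc x (by simp)
      rw [List.foldl_cons, PySem.Dict.setdefault_of_not_contains _ _ hcx,
        ih _ (List.nodup_cons.mp hnd).2 ?side,
        PySem.Dict.items_insert_of_not_contains _ _ hcx]
      · rw [List.map_cons, List.append_assoc, List.singleton_append]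
      case side =>
        intro y hy
        rw [PySem.Dict.contains_insert]
        have hyx : (y == x) = false := by
          simp only [beq_eq_false_iff_ne, ne_eq]
          exact fun h => (List.nodup_cons.mp hnd).1 (h ▸ hy)
        rw [hyx, hc y (by simp [hy])]
        rfl

lemma pvSorted_nodup (maxSeqs : List (List (List Int))) : (pvSorted maxSeqs).Nodup :=
  ((PySem.List.sorted_perm _ _ _).symm).nodup (PySem.Set.nodup_ofList _)

lemma mem_pvSorted (maxSeqs : List (List (List Int))) (y : Int) :
    y ∈ pvSorted maxSeqs ↔ y ∈ pvItems maxSeqs := by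
  unfold pvSorted
  rw [PySem.List.mem_sorted, PySem.Set.mem_ofList]

lemma genStageA_items (maxSeqs : List (List (List Int))) :
    (genStageA maxSeqs).items = (pvSorted maxSeqs).map (fun x => (x, (0 : Int))) := by
  simp only [genStageA, getItemsA_eq]
  rw [PySem.List.foldl_append_eq_flatten, List.nil_append]
  have hfl : ((pvSorted maxSeqs).map (fun x => [x])).flatten = pvSorted maxSeqs := by
    rw [← List.flatMap_def]
    simp
  rw [hfl, setdefault_fold_items _ _ (pvSorted_nodup maxSeqs) (fun x _ => rfl),
    show (PySem.Dict.empty : PySem.Dict Int Int).items = ([] : List (Int × Int)) from rfl,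
    List.nil_append]

lemma genStageA_keys (maxSeqs : List (List (List Int))) :
    (genStageA maxSeqs).keys = pvSorted maxSeqs := by
  simp [PySem.Dict.keys, genStageA_items, Function.comp_def]

lemma genStageA_getD (maxSeqs : List (List (List Int))) (x : Int) :
    (genStageA maxSeqs).getD x 0 = 0 := by
  by_cases hx : x ∈ pvSorted maxSeqs
  · have hitem : (x, (0 : Int)) ∈ (genStageA maxSeqs).items := by
      rw [genStageA_items]
      exact List.mem_map.mpr ⟨x, hx, rfl⟩
    exact PySem.Dict.getD_of_mem_items _ hitem
      (by rw [genStageA_keys]; exact pvSorted_nodup maxSeqs) 0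
  · have hcon : (genStageA maxSeqs).contains x = false := by
      rw [PySem.Dict.contains_eq_decide_mem_keys, genStageA_keys]
      simpa using hx
    exact PySem.Dict.getD_of_not_contains _ 0 hcon

lemma basketLoopA_spec (baskets : List (List Int)) :
    ∀ (st : List (PySem.Dict Int Int)) (k : Nat), st.length = 10 → k < 10 →
    (basketLoopA baskets st (k : Int)).length = 10 ∧
    ∀ i, i < 10 → (basketLoopA baskets st (k : Int)).getD i PySem.Dict.empty =
      if k ≤ i ∧ i - k < baskets.length then
        incA (st.getD i PySem.Dict.empty) (baskets.getD (i - k) [])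
      else st.getD i PySem.Dict.empty := by
  induction baskets with
  | nil =>
      intro st k hl hk
      refine ⟨hl, fun i hi => ?_⟩
      simp [basketLoopA]
  | cons b rest ih =>
      intro st k hl hk
      have hunf : basketLoopA (b :: rest) st (k : Int) =
          (if (k : Int) + 1 ≥ 10 then st.set k (incA (st.getD k PySem.Dict.empty) b)
           else basketLoopA rest (st.set k (incA (st.getD k PySem.Dict.empty) b)) ((k : Int) + 1)) := by
        simp [basketLoopA, incA, PySem.List.pyGetD_natCast]
      by_cases hk9 : k = 9
      · subst hk9
        rw [hunf, if_pos (show ((9 : Nat) : Int) + 1 ≥ 10 by norm_num)]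
        refine ⟨by simpa using hl, fun i hi => ?_⟩
        rw [getD_set, hl]
        by_cases h9 : i = 9
        · subst h9
          rw [if_pos (show (9 : Nat) = 9 ∧ (9 : Nat) < 10 from ⟨rfl, by omega⟩),
            if_pos (show 9 ≤ 9 ∧ 9 - 9 < (b :: rest).length by
              simp only [List.length_cons]; omega)]
          simp
        · rw [if_neg (show ¬((9 : Nat) = i ∧ (9 : Nat) < 10) by omega),
            if_neg (show ¬(9 ≤ i ∧ i - 9 < (b :: rest).length) by omega)]
      · have hcast : (k : Int) + 1 = ((k + 1 : Nat) : Int) := by push_cast; ring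
        rw [hunf, if_neg (show ¬((k : Int) + 1 ≥ 10) by omega), hcast]
        obtain ⟨ih1, ih2⟩ := ih (st.set k (incA (st.getD k PySem.Dict.empty) b)) (k + 1)
          (by simpa using hl) (by omega)
        refine ⟨ih1, fun i hi => ?_⟩
        rw [ih2 i hi, getD_set, hl]
        by_cases hik : i = k
        · subst hik
          rw [if_neg (show ¬(i + 1 ≤ i ∧ i - (i + 1) < rest.length) by omega),
            if_pos (show i = i ∧ i < 10 from ⟨rfl, by omega⟩),
            if_pos (show i ≤ i ∧ i - i < (b :: rest).length by
              simp only [List.length_cons]; omega)]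
          simp
        · rw [if_neg (show ¬(k = i ∧ k < 10) by omega)]
          by_cases hc : k + 1 ≤ i ∧ i - (k + 1) < rest.length
          · rw [if_pos hc, if_pos (show k ≤ i ∧ i - k < (b :: rest).length by
              simp only [List.length_cons]; omega)]
            have hik2 : i - k = (i - (k + 1)) + 1 := by omega
            rw [hik2, List.getD_cons_succ]
          · rw [if_neg hc, if_neg (show ¬(k ≤ i ∧ i - k < (b :: rest).length) by
              simp only [List.length_cons]; omega)]

lemma outerA (cs : List (List (List Int))) :
    ∀ (st : List (PySem.Dict Int Int)), st.length = 10 →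
    (cs.foldl (fun st cu => basketLoopA cu st 0) st).length = 10 ∧
    ∀ i, i < 10 → (cs.foldl (fun st cu => basketLoopA cu st 0) st).getD i PySem.Dict.empty
      = cs.foldl (stepA i) (st.getD i PySem.Dict.empty) := by
  induction cs with
  | nil => intro st hl; exact ⟨hl, fun i hi => rfl⟩
  | cons cu t ih =>
      intro st hl
      have h0 := basketLoopA_spec cu st 0 hl (by omega)
      rw [Nat.cast_zero] at h0
      obtain ⟨hlen, hget⟩ := h0
      obtain ⟨hlen', hget'⟩ := ih _ hlen
      refine ⟨hlen', fun i hi => ?_⟩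
      rw [List.foldl_cons, hget' i hi, hget i hi, List.foldl_cons]
      simp [stepA]

lemma incA_keys (b : List Int) (d : PySem.Dict Int Int) :
    (incA d b).keys = PySem.Set.update d.keys b := by
  have h := PySem.Dict.keys_foldl_modify b 0 (fun _ _ v => v + 1) d
  simpa [incA] using h

lemma foldl_stepA_getD (i : Nat) (cs : List (List (List Int))) :
    ∀ (d : PySem.Dict Int Int) (x : Int),
    (cs.foldl (stepA i) d).getD x 0 = d.getD x 0 + ((pvCol cs i).count x : Int) := by
  induction cs with
  | nil => intro d x; simp [pvCol]
  | cons cu t ih =>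
      intro d x
      rw [List.foldl_cons, ih, show pvCol (cu :: t) i
        = (if i < cu.length then cu.getD i [] else []) ++ pvCol t i from by
          simp [pvCol], List.count_append]
      unfold stepA
      by_cases h : i < cu.length
      · rw [if_pos h, if_pos h]
        unfold incA
        rw [PySem.Dict.getD_foldl_modify_add_one]
        push_cast
        ring
      · rw [if_neg h, if_neg h]
        simp

lemma foldl_stepA_keys (i : Nat) (cs : List (List (List Int))) :
    ∀ (d : PySem.Dict Int Int), (∀ cu ∈ cs, ∀ y ∈ cu.getD i [], y ∈ d.keys) →
    (cs.foldl (stepA i) d).keys = d.keys := by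
  induction cs with
  | nil => intro d _; rfl
  | cons cu t ih =>
      intro d hmem
      have hstep : (stepA i d cu).keys = d.keys := by
        unfold stepA
        split_ifs with h
        · rw [incA_keys, PySem.Set.update_eq_append_filter]
          have hnil : (List.filter (fun y => !PySem.Set.contains d.keys y)
              (PySem.Set.ofList (cu.getD i []))) = [] := by
            rw [List.filter_eq_nil_iff]
            intro y hy
            have hyk : y ∈ d.keys := hmem cu (by simp) y ((PySem.Set.mem_ofList _ _).mp hy)
            simpa using hyk
          rw [hnil, List.append_nil]
        · rfl
      rw [List.foldl_cons,
        ih (stepA i d cu) (fun cu' hcu' y hy => by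
          rw [hstep]; exact hmem cu' (by simp [hcu']) y hy), hstep]

lemma mem_stage_mem_items (maxSeqs : List (List (List Int))) (i : Nat)
    (cu : List (List Int)) (hcu : cu ∈ maxSeqs) (y : Int) (hy : y ∈ cu.getD i []) :
    y ∈ pvItems maxSeqs := by
  unfold pvItems
  rw [List.mem_flatMap]
  refine ⟨cu, hcu, ?_⟩
  rw [List.mem_flatMap]
  by_cases h : i < cu.length
  · refine ⟨cu[i], List.getElem_mem h, ?_⟩
    rwa [List.getD_eq_getElem?_getD, List.getElem?_eq_getElem h] at hy
  · rw [List.getD_eq_getElem?_getD, List.getElem?_eq_none (by omega)] at hy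
    simp at hy

-- B's column at the Int index (i : Nat) < 10 is exactly pvCol
lemma colB_eq (maxSeqs : List (List (List Int))) (i : Nat) :
    maxSeqs.flatMap (fun custom =>
      if (i : Int) < (custom.length : Int) then PySem.List.pyGetD custom (i : Int) [] else [])
      = pvCol maxSeqs i := by
  unfold pvCol
  refine List.flatMap_congr (fun cu _ => ?_)
  rw [PySem.List.pyGetD_natCast]
  by_cases h : i < cu.length
  · rw [if_pos (by exact_mod_cast h), if_pos h]
  · rw [if_neg (by exact_mod_cast h), if_neg h]

-- B unrolled: a map over the ten stage indices
lemma altB_eq (maxSeqs : List (List (List Int))) :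
    genPlotDatas_alt maxSeqs
      = (PySem.List.pyRange 0 10 1).map (fun i =>
          (pvSorted maxSeqs).map (fun x => (x, ((pvCol maxSeqs i.toNat).count x : Int)))) := by
  unfold genPlotDatas_alt
  rw [PySem.List.foldl_append_singleton_eq_map]
  apply List.map_congr_left
  intro i hi
  have h0 : 0 ≤ i := (PySem.List.mem_pyRange_one.mp hi).1
  have hcast : i = ((i.toNat : Nat) : Int) := by omega
  rw [show (PySem.Set.ofList (maxSeqs.flatMap (fun custom => custom.flatMap (fun b => b))))
      = PySem.Set.ofList (pvItems maxSeqs) from rfl]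
  rw [show PySem.List.sorted (PySem.Set.ofList (pvItems maxSeqs)) (fun x => x) false
      = pvSorted maxSeqs from rfl]
  rw [hcast, colB_eq, Int.toNat_natCast]

lemma main_eq (maxSeqs : List (List (List Int))) :
    genPlotDatas maxSeqs = genPlotDatas_alt maxSeqs := by
  have hinit : (PySem.List.pyRange 0 10 1).foldl
      (fun stages _ => stages ++ [genStageA maxSeqs]) ([] : List (PySem.Dict Int Int))
      = List.replicate 10 (genStageA maxSeqs) := by
    rw [PySem.List.foldl_append_singleton_eq_map (f := fun _ => genStageA maxSeqs)]
    rw [show PySem.List.pyRange 0 10 1 = [0,1,2,3,4,5,6,7,8,9] from rfl]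
    rfl
  simp only [genPlotDatas, hinit]
  rw [altB_eq]
  obtain ⟨hlenA, hgetA⟩ := outerA maxSeqs (List.replicate 10 (genStageA maxSeqs))
    (List.length_replicate)
  apply List.ext_getElem
  · rw [List.length_map, List.length_map, hlenA, PySem.List.length_pyRange_one]
    rfl
  · intro i hi₁ hi₂
    have hi : i < 10 := by
      rw [List.length_map, hlenA] at hi₁
      exact hi₁
    have hA' : i < (maxSeqs.foldl (fun st cu => basketLoopA cu st 0)
        (List.replicate 10 (genStageA maxSeqs))).length := by rw [hlenA]; exact hi
    simp only [List.getElem_map]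
    rw [← List.getD_eq_getElem _ PySem.Dict.empty hA', hgetA i hi]
    have hbA : (List.replicate 10 (genStageA maxSeqs)).getD i PySem.Dict.empty
        = genStageA maxSeqs := by
      rw [List.getD_eq_getElem?_getD, List.getElem?_replicate, if_pos hi]
      rfl
    rw [hbA]
    simp only [PySem.List.getElem_pyRange_one, zero_add, Int.toNat_natCast]
    have hkeys : (maxSeqs.foldl (stepA i) (genStageA maxSeqs)).keys = pvSorted maxSeqs := by
      rw [foldl_stepA_keys i maxSeqs (genStageA maxSeqs) (fun cu hcu y hy => by
        rw [genStageA_keys]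
        exact (mem_pvSorted maxSeqs y).mpr (mem_stage_mem_items maxSeqs i cu hcu y hy))]
      exact genStageA_keys maxSeqs
    have hnd : (maxSeqs.foldl (stepA i) (genStageA maxSeqs)).keys.Nodup := by
      rw [hkeys]; exact pvSorted_nodup maxSeqs
    rw [PySem.Dict.items_eq_map_keys _ hnd 0, hkeys]
    apply List.map_congr_left
    intro x hx
    rw [foldl_stepA_getD i maxSeqs, genStageA_getD]
    ring_nf

-- ===== VERDICT (by name: the statement is the Claim_ definition above) =====
theorem genPlotDatas_spec : Claim_equal_genPlotDatas := by
  intro maxSeqs _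
  unfold Spec_genPlotDatas
  exact main_eq maxSeqs
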